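-- pv_equiv track=rewrite | github.com/smearle/script-doctor | env.py | expand_collision_layers
-- ===== SOURCE A (Python) =====
-- from typing import Dict, Iterable, List, Optional, Tuple, Union
--
-- def expand_collision_layers(collision_layers, meta_objs, char_to_obj):
--     # Preprocess collision layers to replace joint objects with their sub-objects
--     # TODO: could do this more elegantly using `expand_meta_objs`, right?
--     # for i, l in enumerate(collision_layers):
--     #     j = 0
--     #     for o in l:
--     #         if o in meta_objs:
--     #             subtiles = meta_objs[o]
--     #             l = l[:j] + subtiles + l[j+1:]
--     #             collision_layers[i] = l
--     #             # HACK: we could do this more efficiently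
--     #             expand_collision_layers(collision_layers, meta_objs=meta_objs)
--     #             j += len(subtiles)
--     #         else:
--     #             j += 1
--     cl = []
--     for l in collision_layers:
--         l_1 = []
--         for o in l:
--             l_1 += expand_meta_objs([o], meta_objs, char_to_obj)
--         cl.append(l_1)
--     return cl
--
-- def expand_meta_objs(tile_list: List, meta_objs, char_to_obj):
--     assert isinstance(tile_list, list), f"tile_list should be a list, got {type(tile_list)}"
--     expanded_meta_objs = []
--     for mo in tile_list:
--         if mo in meta_objs:
--             expanded_meta_objs += expand_meta_objs(meta_objs[mo], meta_objs, char_to_obj)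
--         elif mo in char_to_obj:
--             expanded_meta_objs.append(char_to_obj[mo])
--         # elif mt in obj_to_idxs:
--         else:
--             expanded_meta_objs.append(mo)
--         # else:
--         #     raise Exception(f'Invalid meta-tile `{mt}`.')
--     return expanded_meta_objs
-- ===== SOURCE B (Python) =====
-- def expand_collision_layers(collision_layers, meta_objs, char_to_obj):
--     # Iterative worklist flatten: same depth-first left-to-right expansion, no recursion.
--     cl = []
--     for l in collision_layers:
--         out = []
--         stack = list(reversed(l))
--         while stack:
--             tok = stack.pop()
--             if tok in meta_objs:
--                 sub = meta_objs[tok]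
--                 assert isinstance(sub, list), f"tile_list should be a list, got {type(sub)}"
--                 stack.extend(reversed(sub))
--             elif tok in char_to_obj:
--                 out.append(char_to_obj[tok])
--             else:
--                 out.append(tok)
--         cl.append(out)
--     return cl
-- ===== Notes on version B (the rewrite author's own statement) =====
-- stated objective: alternative
-- what changed: Replaces A's recursive expand_meta_objs helper with an explicit stack/worklist loop that pushes a meta key's sub-objects (leftmost on top) and appends resolved tokens to one output list, reproducing the same depth-first left-to-right expansion without recursion.
import Mathlib
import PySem

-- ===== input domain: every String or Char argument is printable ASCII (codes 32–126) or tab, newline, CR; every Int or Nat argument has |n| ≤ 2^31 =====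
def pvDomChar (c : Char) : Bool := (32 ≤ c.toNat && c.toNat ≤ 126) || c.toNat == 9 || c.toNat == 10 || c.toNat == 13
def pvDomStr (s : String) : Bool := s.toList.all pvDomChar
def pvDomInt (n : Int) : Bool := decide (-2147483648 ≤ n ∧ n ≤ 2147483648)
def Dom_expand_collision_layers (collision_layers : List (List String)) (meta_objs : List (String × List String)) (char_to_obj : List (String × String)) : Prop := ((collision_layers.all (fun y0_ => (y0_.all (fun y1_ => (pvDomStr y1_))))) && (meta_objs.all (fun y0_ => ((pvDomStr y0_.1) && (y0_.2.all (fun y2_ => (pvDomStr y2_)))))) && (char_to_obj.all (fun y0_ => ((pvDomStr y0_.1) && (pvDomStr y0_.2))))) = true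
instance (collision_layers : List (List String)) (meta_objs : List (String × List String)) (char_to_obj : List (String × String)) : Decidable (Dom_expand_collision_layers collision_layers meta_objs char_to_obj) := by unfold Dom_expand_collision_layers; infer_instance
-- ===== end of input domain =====

-- B replaces A's recursive expansion with an explicit stack/worklist flatten (same depth-first
-- left-to-right order, no recursion); the Lean ports thread the dict with the expanded key erased
-- along the path purely as a termination guard — unobservable on acyclic meta_objs (Pre_).

-- first-match association-list lookup (= Python dict lookup on the given assoc list)
def pvLookup {β : Type} : List (String × β) → String → Option β
  | [], _ => none
  | (k, v) :: rest, x => if k = x then some v else pvLookup rest x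

-- remove the first binding of a key (termination guard only; never observable under Pre_)
def pvErase {β : Type} : List (String × β) → String → List (String × β)
  | [], _ => []
  | (k, v) :: rest, x => if k = x then rest else (k, v) :: pvErase rest x

theorem pvErase_length_lt {β : Type} (m : List (String × β)) (x : String) (v : β)
    (h : pvLookup m x = some v) : (pvErase m x).length < m.length := by
  induction m with
  | nil => simp [pvLookup] at h
  | cons p rest ih =>
    obtain ⟨k, w⟩ := p
    by_cases hk : k = x
    · simp [pvErase, hk]
    · simp [pvLookup, hk] at h
      simp [pvErase, hk]
      exact ih h

-- ===== PORT A =====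
-- expand_meta_objs: the recursion of A (the dict shrinks along the path as a termination guard)
def expandMetaA : List (String × List String) → List (String × String) → List String → List String
  | _, _, [] => []
  | m, c, mo :: rest =>
    match h : pvLookup m mo with
    | some v => expandMetaA (pvErase m mo) c v ++ expandMetaA m c rest
    | none =>
      (match pvLookup c mo with
       | some ch => [ch]
       | none => [mo]) ++ expandMetaA m c rest
termination_by m _ l => (m.length, l.length)
decreasing_by
  · exact Prod.Lex.left _ _ (pvErase_length_lt m mo v h)
  · exact Prod.Lex.right _ (by simp)
  · exact Prod.Lex.right _ (by simp)

-- the per-layer loop of A: l_1 += expand_meta_objs([o], …) for each o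
def pvLayerA (m : List (String × List String)) (c : List (String × String)) : List String → List String
  | [] => []
  | o :: rest => expandMetaA m c [o] ++ pvLayerA m c rest

def expand_collision_layers (collision_layers : List (List String)) (meta_objs : List (String × List String)) (char_to_obj : List (String × String)) : List (List String) :=
  collision_layers.map (fun l => pvLayerA meta_objs char_to_obj l)

-- ===== PORT B =====
-- weight of a dict: each stack entry carries its (path-erased) dict; popping a meta key replaces
-- one entry of weight (|v|+2)·W(m') by |v| entries of weight W(m'), so the total sum decreases.
def pvW (m : List (String × List String)) : Nat := (m.map (fun p => p.2.length + 2)).prod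

theorem pvW_pos (m : List (String × List String)) : 0 < pvW m := by
  induction m with
  | nil => simp [pvW]
  | cons p rest ih =>
    have h : pvW (p :: rest) = (p.2.length + 2) * pvW rest := by simp [pvW, List.prod_cons]
    rw [h]; exact Nat.mul_pos (by omega) ih

theorem pvW_erase (m : List (String × List String)) (x : String) (v : List String)
    (h : pvLookup m x = some v) : pvW m = (v.length + 2) * pvW (pvErase m x) := by
  induction m with
  | nil => simp [pvLookup] at h
  | cons p rest ih =>
    obtain ⟨k, w⟩ := p
    by_cases hk : k = x
    · simp [pvLookup, hk] at h
      simp [pvW, pvErase, hk, List.prod_cons, h]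
    · simp [pvLookup, hk] at h
      simp [pvW, pvErase, hk, List.prod_cons] at *
      rw [ih h]; ring

-- the worklist loop of B: pop a token; a meta key pushes its sub-objects (leftmost on top),
-- otherwise the (char-mapped) token is appended to the output
def pvRunStack (c : List (String × String)) : List (String × List (String × List String)) → List String → List String
  | [], out => out
  | (tok, m) :: stack, out =>
    match h : pvLookup m tok with
    | some v => pvRunStack c (v.map (fun t => (t, pvErase m tok)) ++ stack) out
    | none =>
      match pvLookup c tok with
      | some ch => pvRunStack c stack (out ++ [ch])
      | none => pvRunStack c stack (out ++ [tok])
termination_by stack _ => (stack.map (fun e => pvW e.2)).sum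
decreasing_by
  · simp [List.map_map, Function.comp_def]
    rw [pvW_erase m tok v h]
    have := pvW_pos (pvErase m tok)
    nlinarith
  · have := pvW_pos m; simp; omega
  · have := pvW_pos m; simp; omega

def expand_collision_layers_alt (collision_layers : List (List String)) (meta_objs : List (String × List String)) (char_to_obj : List (String × String)) : List (List String) :=
  collision_layers.map (fun l => pvRunStack char_to_obj (l.map (fun t => (t, meta_objs))) [])

-- ===== PRECONDITION & SPEC =====
-- successors of a key in the meta_objs graph: the elements of its first-match value
def pvSuccs (m : List (String × List String)) (k : String) : List String :=
  ((m.find? (fun p => p.1 == k)).map Prod.snd).getD []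

-- one step of reachability along meta_objs edges
def pvStepReach (m : List (String × List String)) (s : List String) : List String :=
  (s ++ s.flatMap (pvSuccs m)).dedup

def pvReach : Nat → List (String × List String) → List String → List String
  | 0, _, s => s
  | n + 1, m, s => pvReach n m (pvStepReach m s)

-- Pre_ requires that no meta_objs key reachable from a layer token lies on a cycle of the
-- meta_objs graph (first-match lookup): exactly there A's recursion never terminates, so it
-- raises RecursionError (and B loops).
def Pre_expand_collision_layers (collision_layers : List (List String)) (meta_objs : List (String × List String)) (char_to_obj : List (String × String)) : Prop :=
  (((pvReach meta_objs.length meta_objs collision_layers.flatten).filter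
      (fun k => (meta_objs.map Prod.fst).contains k)).all
    (fun k => !((pvReach meta_objs.length meta_objs (pvSuccs meta_objs k)).contains k))) = true
instance (collision_layers : List (List String)) (meta_objs : List (String × List String)) (char_to_obj : List (String × String)) : Decidable (Pre_expand_collision_layers collision_layers meta_objs char_to_obj) := by unfold Pre_expand_collision_layers; infer_instance

def pvWitness_expand_collision_layers : List (List String) × (List (String × List String)) × (List (String × String)) :=
  ([["a", "b"], ["e"]], [("b", ["c", "d"]), ("d", ["e"])], [("c", "crate")])

def Spec_expand_collision_layers (collision_layers : List (List String)) (meta_objs : List (String × List String)) (char_to_obj : List (String × String)) (out : List (List String)) : Prop := out = expand_collision_layers_alt collision_layers meta_objs char_to_obj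
instance (collision_layers : List (List String)) (meta_objs : List (String × List String)) (char_to_obj : List (String × String)) (out : List (List String)) : Decidable (Spec_expand_collision_layers collision_layers meta_objs char_to_obj out) := by unfold Spec_expand_collision_layers; infer_instance

-- ===== CLAIM (what is proved, stated in full; the proofs are below) =====
def Claim_equal_expand_collision_layers : Prop := ∀ (collision_layers : List (List String)) (meta_objs : List (String × List String)) (char_to_obj : List (String × String)), Dom_expand_collision_layers collision_layers meta_objs char_to_obj → Pre_expand_collision_layers collision_layers meta_objs char_to_obj → Spec_expand_collision_layers collision_layers meta_objs char_to_obj (expand_collision_layers collision_layers meta_objs char_to_obj)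

-- ===== LEMMAS AND PROOFS =====

theorem expandMetaA_nil (m : List (String × List String)) (c : List (String × String)) :
    expandMetaA m c [] = [] := by rw [expandMetaA]

theorem expandMetaA_cons_some (m : List (String × List String)) (c : List (String × String))
    (mo : String) (rest : List String) (v : List String) (h : pvLookup m mo = some v) :
    expandMetaA m c (mo :: rest) = expandMetaA (pvErase m mo) c v ++ expandMetaA m c rest := by
  rw [expandMetaA]; split <;> simp_all

theorem expandMetaA_cons_none (m : List (String × List String)) (c : List (String × String))
    (mo : String) (rest : List String) (h : pvLookup m mo = none) :
    expandMetaA m c (mo :: rest) =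
      (match pvLookup c mo with | some ch => [ch] | none => [mo]) ++ expandMetaA m c rest := by
  rw [expandMetaA]; split <;> simp_all

theorem expandMetaA_append (m : List (String × List String)) (c : List (String × String))
    (l1 l2 : List String) : expandMetaA m c (l1 ++ l2) = expandMetaA m c l1 ++ expandMetaA m c l2 := by
  induction l1 with
  | nil => simp [expandMetaA_nil]
  | cons mo rest ih =>
    cases h : pvLookup m mo with
    | some v => simp [expandMetaA_cons_some _ _ _ _ _ h, ih]
    | none => simp [expandMetaA_cons_none _ _ _ _ h, ih]

theorem expandMetaA_eq_flatten (m : List (String × List String)) (c : List (String × String))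
    (l : List String) : expandMetaA m c l = (l.map (fun t => expandMetaA m c [t])).flatten := by
  induction l with
  | nil => simp [expandMetaA_nil]
  | cons mo rest ih =>
    have h : mo :: rest = [mo] ++ rest := rfl
    rw [h, expandMetaA_append, ih]; simp

theorem pvRunStack_eq (c : List (String × String))
    (stack : List (String × List (String × List String))) (out : List String) :
    pvRunStack c stack out = out ++ (stack.map (fun e => expandMetaA e.2 c [e.1])).flatten := by
  induction stack, out using pvRunStack.induct c with
  | case1 out => simp [pvRunStack]
  | case2 tok m stack out v h ih =>
    rw [show pvRunStack c ((tok, m) :: stack) out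
          = pvRunStack c (v.map (fun t => (t, pvErase m tok)) ++ stack) out by
        rw [pvRunStack]; split <;> simp_all]
    rw [ih]
    have h1 : expandMetaA m c [tok] = expandMetaA (pvErase m tok) c v := by
      rw [expandMetaA_cons_some _ _ _ _ _ h, expandMetaA_nil, List.append_nil]
    simp [h1, expandMetaA_eq_flatten (pvErase m tok) c v, List.map_map, Function.comp_def]
  | case3 tok m stack out h ch hc ih =>
    rw [show pvRunStack c ((tok, m) :: stack) out = pvRunStack c stack (out ++ [ch]) by
        rw [pvRunStack]; split <;> simp_all]
    rw [ih]
    have h1 : expandMetaA m c [tok] = [ch] := by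
      rw [expandMetaA_cons_none _ _ _ _ h, expandMetaA_nil, List.append_nil]; simp [hc]
    simp [h1]
  | case4 tok m stack out h hc ih =>
    rw [show pvRunStack c ((tok, m) :: stack) out = pvRunStack c stack (out ++ [tok]) by
        rw [pvRunStack]; split <;> simp_all]
    rw [ih]
    have h1 : expandMetaA m c [tok] = [tok] := by
      rw [expandMetaA_cons_none _ _ _ _ h, expandMetaA_nil, List.append_nil]; simp [hc]
    simp [h1]

theorem pvLayerA_eq_flatten (m : List (String × List String)) (c : List (String × String))
    (l : List String) : pvLayerA m c l = (l.map (fun t => expandMetaA m c [t])).flatten := by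
  induction l with
  | nil => simp [pvLayerA]
  | cons o rest ih => simp [pvLayerA, ih]

-- ===== VERDICT (by name: the statement is the Claim_ definition above) =====
theorem expand_collision_layers_spec : Claim_equal_expand_collision_layers := by
  intro collision_layers meta_objs char_to_obj _ _
  unfold Spec_expand_collision_layers expand_collision_layers expand_collision_layers_alt
  apply List.map_congr_left
  intro l _
  rw [pvRunStack_eq, pvLayerA_eq_flatten]
  simp [List.map_map, Function.comp_def]
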